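-- pv_equiv track=rewrite | github.com/avs-shivhare/Sheet_Solution | Triangle shrinking downwards/Triangle_shrinking_downwards.py | triDownwards
-- ===== SOURCE A (Python) =====
-- def triDownwards(s):
--     # in this problem we have to replace character with dot(.)
--     n = len(s)
--     ans = "";
--     for i in range(0,n):
--         # add dot(.) first;
--         for j in range(0,i):
--             ans += ".";
--         # add remain character
--         for j in range(i,n):
--             ans += s[j];
--     return ans;
-- ===== SOURCE B (Python) =====
-- def triDownwards(s):
--     buf = list(s)
--     rows = []
--     for i in range(len(s)):
--         if i > 0:
--             buf[i - 1] = "."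
--         rows.append("".join(buf))
--     return "".join(rows)
-- ===== Notes on version B (the rewrite author's own statement) =====
-- stated objective: faster
-- what changed: B maintains a single running character buffer, blanking one more position per row and joining snapshots, instead of A's per-row rebuild that appends i dots and then re-scans the suffix one character at a time with string concatenation.
import Mathlib
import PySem

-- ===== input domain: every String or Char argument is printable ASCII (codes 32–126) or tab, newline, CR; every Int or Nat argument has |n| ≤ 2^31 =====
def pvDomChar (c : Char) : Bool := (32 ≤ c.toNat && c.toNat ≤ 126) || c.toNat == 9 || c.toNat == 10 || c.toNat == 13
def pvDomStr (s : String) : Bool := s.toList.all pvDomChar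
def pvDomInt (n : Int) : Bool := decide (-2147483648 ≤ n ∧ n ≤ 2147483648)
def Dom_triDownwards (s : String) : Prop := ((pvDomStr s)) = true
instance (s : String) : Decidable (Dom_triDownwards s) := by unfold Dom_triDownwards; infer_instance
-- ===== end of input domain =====

-- B maintains one running character buffer, blanking one more position per row and joining
-- snapshots, instead of A's per-row rebuild by per-character string concatenation; the timing
-- run measured B faster (constant factor).

-- ===== PORT A =====
-- A: for i in range(n): append i dots, then append s[j] for j in range(i,n).
def triDownwards (s : String) : String :=
  let cs := s.toList
  let n := cs.length
  let ans : List Char := (List.range n).foldl (fun ans i =>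
    let ans := (List.range i).foldl (fun ans _ => ans ++ ['.']) ans
    (List.range' i (n - i)).foldl (fun ans j => ans ++ [cs.getD j ' ']) ans) []
  String.ofList ans

-- ===== PORT B =====
-- B: running buffer; before emitting row i (i>0) set buf[i-1] := '.', snapshot each row, join.
def triDownwards_alt (s : String) : String :=
  let res := (List.range s.toList.length).foldl
    (fun (st : List Char × List (List Char)) i =>
      let buf := if 0 < i then st.1.set (i - 1) '.' else st.1
      (buf, st.2 ++ [buf]))
    (s.toList, [])
  String.ofList res.2.flatten

-- ===== PRECONDITION & SPEC =====
def Spec_triDownwards (s : String) (out : String) : Prop := out = triDownwards_alt s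
instance (s : String) (out : String) : Decidable (Spec_triDownwards s out) := by unfold Spec_triDownwards; infer_instance

-- ===== CLAIM (what is proved, stated in full; the proofs are below) =====
def Claim_equal_triDownwards : Prop := ∀ (s : String), Dom_triDownwards s → Spec_triDownwards s (triDownwards s)

-- ===== LEMMAS AND PROOFS =====

-- the i-th row, shared characterisation of both ports
def pvRow (cs : List Char) (i : ℕ) : List Char := List.replicate i '.' ++ cs.drop i

theorem pv_dots_fold (i : ℕ) (ans : List Char) :
    (List.range i).foldl (fun ans _ => ans ++ ['.']) ans = ans ++ List.replicate i '.' := by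
  induction i generalizing ans with
  | zero => simp
  | succ k ih => simp [List.range_succ, ih, List.replicate_succ']

theorem pv_suffix_fold (cs : List Char) (k i : ℕ) (h : i + k = cs.length) (ans : List Char) :
    (List.range' i k).foldl (fun ans j => ans ++ [cs.getD j ' ']) ans = ans ++ cs.drop i := by
  induction k generalizing i ans with
  | zero => simp [List.drop_of_length_le (by omega : cs.length ≤ i)]
  | succ k ih =>
    have hi : i < cs.length := by omega
    rw [List.range'_succ, List.foldl_cons, ih (i + 1) (by omega),
        List.getD_eq_getElem cs ' ' hi, List.drop_eq_getElem_cons hi]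
    simp

theorem pv_A_fold (cs : List Char) (m : ℕ) (hm : m ≤ cs.length) :
    (List.range m).foldl (fun ans i =>
      (List.range' i (cs.length - i)).foldl (fun ans j => ans ++ [cs.getD j ' '])
        ((List.range i).foldl (fun ans _ => ans ++ ['.']) ans)) []
    = (List.range m).flatMap (pvRow cs) := by
  induction m with
  | zero => simp
  | succ k ih =>
    rw [List.range_succ, List.foldl_append, ih (by omega), List.foldl_cons, List.foldl_nil,
        pv_dots_fold, pv_suffix_fold cs (cs.length - k) k (by omega)]
    simp [pvRow, List.flatMap_append]

theorem pv_A_rows (s : String) :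
    triDownwards s = String.ofList ((List.range s.toList.length).flatMap (pvRow s.toList)) := by
  show String.ofList ((List.range s.toList.length).foldl (fun ans i =>
      (List.range' i (s.toList.length - i)).foldl (fun ans j => ans ++ [s.toList.getD j ' '])
        ((List.range i).foldl (fun ans _ => ans ++ ['.']) ans)) [])
    = _
  rw [pv_A_fold s.toList s.toList.length le_rfl]

theorem pv_row_step (cs : List Char) (i : ℕ) (hi : i < cs.length) :
    (pvRow cs i).set i '.' = pvRow cs (i + 1) := by
  unfold pvRow
  rw [List.set_eq_take_append_cons_drop]
  have hlen : i < (List.replicate i '.' ++ cs.drop i).length := by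
    simp; omega
  rw [if_pos hlen, List.take_append_of_le_length (by simp), List.take_replicate, min_self,
      List.drop_append]
  simp [List.replicate_succ', List.drop_drop, List.append_assoc]

theorem pv_B_inv (cs : List Char) (m : ℕ) (hm : m ≤ cs.length) :
    (List.range m).foldl
      (fun (st : List Char × List (List Char)) i =>
        let buf := if 0 < i then st.1.set (i - 1) '.' else st.1
        (buf, st.2 ++ [buf]))
      (cs, [])
    = ((if m = 0 then cs else pvRow cs (m - 1)), (List.range m).map (pvRow cs)) := by
  induction m with
  | zero => simp
  | succ k ih =>
    rw [List.range_succ, List.foldl_append, ih (by omega), List.foldl_cons, List.foldl_nil]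
    cases k with
    | zero => simp [pvRow]
    | succ k' =>
      simp only [Nat.succ_ne_zero, if_false, Nat.add_sub_cancel, if_pos (Nat.succ_pos k')]
      rw [pv_row_step cs k' (by omega)]
      simp [List.range_succ]

theorem pv_B_rows (s : String) :
    triDownwards_alt s = String.ofList ((List.range s.toList.length).flatMap (pvRow s.toList)) := by
  unfold triDownwards_alt
  rw [pv_B_inv s.toList s.toList.length le_rfl]
  simp [List.flatMap_def]

-- ===== VERDICT (by name: the statement is the Claim_ definition above) =====
theorem triDownwards_spec : Claim_equal_triDownwards := by
  intro s _
  unfold Spec_triDownwards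
  rw [pv_A_rows, pv_B_rows]
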